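-- pv_equiv track=rewrite | github.com/alexis-raymond/Daily_Coding_Problems | edabit/sum_of_holes.py | sumOfHoles
-- ===== SOURCE A (Python) =====
-- def sumOfHoles(N): # returns the number of holes in the range 0 < n <= N
-- 	holes = {
-- 		"0": 1,
-- 		"1": 0,
-- 		"2": 0,
-- 		"3": 0,
-- 		"4": 1,
-- 		"5": 0,
-- 		"6": 1,
-- 		"7": 0,
-- 		"8": 2,
-- 		"9": 1
-- 	} # create a dictionary that holds the number of holes in all 10 digits
--
-- 	hole_count = 0 # create a variable to hold the count of holes
--
-- 	for i in range(1, N + 1): # iterate through the numbers from 1 to N inclusively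
-- 		for digit in str(i): # iterate through the digits in the iterated number
-- 			hole_count += holes[digit] # add the number of holes in the iterated number to the count
--
-- 	return hole_count # return the total count
-- ===== SOURCE B (Python) =====
-- def sumOfHoles(N):
--     # Closed-form digit recursion: O(log^2 N) instead of iterating every number.
--     HOLES = (1, 0, 0, 0, 1, 0, 1, 0, 2, 1)
--     PREF = (1, 1, 1, 1, 2, 2, 3, 3, 5, 6)  # prefix sums of HOLES
--
--     def digit_holes(n):  # holes in the decimal digits of n (0 for n == 0)
--         t = 0
--         while n > 0:
--             t += HOLES[n % 10]
--             n //= 10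
--         return t
--
--     def S(n):  # total holes over 1..n
--         if n <= 0:
--             return 0
--         q, r = divmod(n, 10)
--         return 10 * S(q - 1) + 6 * q + (r + 1) * digit_holes(q) + PREF[r] - 1
--
--     return S(N)
-- ===== Notes on version B (the rewrite author's own statement) =====
-- stated objective: faster
-- what changed: A sums per-digit holes of every number 1..N via str(); B computes the total with a base-10 divide-and-conquer recurrence S(N) = 10*S(N//10 - 1) + 6*(N//10) + (N%10 + 1)*digit_holes(N//10) + PREF[N%10] - 1, touching only O(log N) numbers.
import Mathlib
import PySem

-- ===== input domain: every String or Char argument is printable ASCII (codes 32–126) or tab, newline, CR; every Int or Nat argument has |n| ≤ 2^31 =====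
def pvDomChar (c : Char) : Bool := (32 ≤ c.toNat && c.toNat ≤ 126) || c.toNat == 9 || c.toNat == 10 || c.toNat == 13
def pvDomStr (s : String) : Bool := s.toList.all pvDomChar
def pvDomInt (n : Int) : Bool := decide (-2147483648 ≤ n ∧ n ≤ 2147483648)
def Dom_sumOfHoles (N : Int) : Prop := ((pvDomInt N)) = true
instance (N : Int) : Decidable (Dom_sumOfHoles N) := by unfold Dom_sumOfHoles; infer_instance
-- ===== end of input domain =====

-- B replaces A's per-number loop over 1..N by a base-10 divide-and-conquer recursion
-- (objective: faster, O(log^2 N) arithmetic steps instead of O(N log N)).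

-- ===== PORT A =====
-- the `holes` dict literal of A
def pvHolesDict : PySem.Dict String Int :=
  PySem.Dict.ofList
    [("0", 1), ("1", 0), ("2", 0), ("3", 0), ("4", 1),
     ("5", 0), ("6", 1), ("7", 0), ("8", 2), ("9", 1)]

-- `holes[digit]` can only raise KeyError on a non-digit character, which str(i) for i ≥ 1
-- never produces; it is ported as getD with default 0 (the default is never used).
def sumOfHoles (N : Int) : Int :=
  (PySem.List.pyRange 1 (N + 1)).foldl
    (fun holeCount i =>
      (PySem.Int.toStr i).toList.foldl
        (fun hc digit => hc + pvHolesDict.getD (String.ofList [digit]) 0)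
        holeCount)
    0

-- ===== PORT B =====
-- the HOLES and PREF tuples of B
def pvHolesT : List Int := [1, 0, 0, 0, 1, 0, 1, 0, 2, 1]
def pvPrefT : List Int := [1, 1, 1, 1, 2, 2, 3, 3, 5, 6]

-- B's `digit_holes` while-loop as structural recursion on the quotient chain
def pvDigitHoles (n : Int) : Int :=
  if _h : 0 < n then
    PySem.List.pyGetD pvHolesT (PySem.Int.mod n 10) 0
      + pvDigitHoles (PySem.Int.floordiv n 10)
  else 0
termination_by n.toNat
decreasing_by
  simp only [PySem.Int.floordiv_eq_ediv_of_pos (by norm_num : (0:Int) < 10)]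
  omega

-- B's recursive `S`
def pvS (n : Int) : Int :=
  if h : 0 < n then
    let q := PySem.Int.floordiv n 10
    let r := PySem.Int.mod n 10
    10 * pvS (q - 1) + 6 * q + (r + 1) * pvDigitHoles q
      + PySem.List.pyGetD pvPrefT r 0 - 1
  else 0
termination_by n.toNat
decreasing_by
  simp only [PySem.Int.floordiv_eq_ediv_of_pos (by norm_num : (0:Int) < 10)]
  omega

def sumOfHoles_alt (N : Int) : Int := pvS N

-- ===== PRECONDITION & SPEC =====
def Spec_sumOfHoles (N : Int) (out : Int) : Prop := out = sumOfHoles_alt N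
instance (N : Int) (out : Int) : Decidable (Spec_sumOfHoles N out) := by unfold Spec_sumOfHoles; infer_instance

-- ===== CLAIM (what is proved, stated in full; the proofs are below) =====
def Claim_equal_sumOfHoles : Prop := ∀ (N : Int), Dom_sumOfHoles N → Spec_sumOfHoles N (sumOfHoles N)

-- ===== LEMMAS AND PROOFS =====

-- proof-side abbreviations for B's table lookups
def pvHole (r : Int) : Int := PySem.List.pyGetD pvHolesT r 0
def pvPref (r : Int) : Int := PySem.List.pyGetD pvPrefT r 0

-- the per-character hole weight A looks up in its dict
def pvCharHole (c : Char) : Int := pvHolesDict.getD (String.ofList [c]) 0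

-- hole sum of the decimal string of n (what A's inner loop adds for the number n)
def pvStrHoles (n : Nat) : Int := ((Nat.toDigits 10 n).map pvCharHole).sum

-- A's dict lookup at a digit character agrees with B's HOLES table
lemma pvCharHole_digit (d : Nat) (hd : d < 10) :
    pvCharHole (Nat.digitChar d) = pvHole (d : Int) := by
  interval_cases d <;> decide

-- the PREF table really is the prefix-sum of the HOLES table
lemma pvPref_step (r : Int) (h1 : 1 ≤ r) (h2 : r < 10) :
    pvPref r = pvPref (r - 1) + pvHole r := by
  interval_cases r <;> decide

-- unfoldings of B's two recursions, with floordiv/mod turned into `/`/`%` (divisor 10 > 0)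
lemma pvDigitHoles_pos (n : Int) (h : 0 < n) :
    pvDigitHoles n = pvHole (n % 10) + pvDigitHoles (n / 10) := by
  rw [pvDigitHoles, dif_pos h,
    PySem.Int.mod_eq_emod_of_pos (by norm_num : (0:Int) < 10),
    PySem.Int.floordiv_eq_ediv_of_pos (by norm_num : (0:Int) < 10)]
  rfl

lemma pvDigitHoles_nonpos (n : Int) (h : n ≤ 0) : pvDigitHoles n = 0 := by
  rw [pvDigitHoles, dif_neg (by omega)]

lemma pvS_pos (n : Int) (h : 0 < n) :
    pvS n = 10 * pvS (n / 10 - 1) + 6 * (n / 10) + (n % 10 + 1) * pvDigitHoles (n / 10)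
      + pvPref (n % 10) - 1 := by
  rw [pvS, dif_pos h,
    PySem.Int.mod_eq_emod_of_pos (by norm_num : (0:Int) < 10),
    PySem.Int.floordiv_eq_ediv_of_pos (by norm_num : (0:Int) < 10)]
  rfl

lemma pvB_nonpos (n : Int) (h : n ≤ 0) : pvS n = 0 := by
  rw [pvS, dif_neg (by omega)]

-- `Nat.toDigitsCore`'s accumulator is just appended to the result
lemma pvToDigitsCore_acc (b f : Nat) :
    ∀ (n : Nat) (ds : List Char),
      Nat.toDigitsCore b f n ds = Nat.toDigitsCore b f n [] ++ ds := by
  induction f with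
  | zero => intro n ds; simp [Nat.toDigitsCore]
  | succ f ih =>
    intro n ds
    simp only [Nat.toDigitsCore]
    by_cases h : n / b = 0
    · simp [h]
    · simp only [h, if_false]
      rw [ih (n / b) ((n % b).digitChar :: ds), ih (n / b) [(n % b).digitChar]]
      simp

-- with enough fuel, `Nat.toDigitsCore` does not depend on the fuel
lemma pvToDigitsCore_fuel (b : Nat) (hb : 2 ≤ b) :
    ∀ (f1 f2 n : Nat) (ds : List Char), n < f1 → n < f2 →
      Nat.toDigitsCore b f1 n ds = Nat.toDigitsCore b f2 n ds := by
  intro f1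
  induction f1 with
  | zero => intro f2 n ds h1; omega
  | succ f1 ih =>
    intro f2 n ds h1 h2
    cases f2 with
    | zero => omega
    | succ f2 =>
      simp only [Nat.toDigitsCore]
      by_cases h : n / b = 0
      · simp [h]
      · simp only [h, if_false]
        have hn0 : 0 < n := Nat.pos_of_ne_zero (fun hz => h (by simp [hz]))
        have hnb : n / b < n := Nat.div_lt_self hn0 (by omega)
        exact ih f2 (n / b) ((n % b).digitChar :: ds) (by omega) (by omega)

lemma pvToDigits_small (n : Nat) (h : n < 10) :
    Nat.toDigits 10 n = [Nat.digitChar n] := by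
  simp [Nat.toDigits, Nat.toDigitsCore, Nat.div_eq_of_lt h, Nat.mod_eq_of_lt h]

lemma pvToDigits_split (n : Nat) (h : 10 ≤ n) :
    Nat.toDigits 10 n = Nat.toDigits 10 (n / 10) ++ [Nat.digitChar (n % 10)] := by
  have hq : n / 10 ≠ 0 := by omega
  show Nat.toDigitsCore 10 (n + 1) n [] = _
  rw [show Nat.toDigitsCore 10 (n + 1) n [] = Nat.toDigitsCore 10 n (n / 10) [(n % 10).digitChar] by
        simp only [Nat.toDigitsCore]; simp [hq]]
  rw [pvToDigitsCore_acc]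
  rw [pvToDigitsCore_fuel 10 (by norm_num) n (n / 10 + 1) (n / 10) [] (by omega) (by omega)]
  rfl

-- positive integers print as their Nat digit string
lemma pvToChars_pos (n : Int) (h : 0 < n) :
    PySem.Int.toChars n = Nat.toDigits 10 n.toNat := by
  simp [PySem.Int.toChars, not_lt.mpr (le_of_lt h)]

-- A's inner sum over str(n) equals B's digit_holes, for n ≥ 1
lemma pvStrHoles_eq (n : Nat) (h : 0 < n) : pvStrHoles n = pvDigitHoles (n : Int) := by
  induction n using Nat.strong_induction_on with
  | _ n ih =>
    have hpos : (0:Int) < (n : Int) := by exact_mod_cast h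
    rw [pvDigitHoles_pos _ hpos]
    have hm : ((n:Int) % 10) = ((n % 10 : Nat) : Int) := by omega
    have hd : ((n:Int) / 10) = ((n / 10 : Nat) : Int) := by omega
    rw [hm, hd]
    by_cases h10 : n < 10
    · have hq0 : n / 10 = 0 := by omega
      have hr : n % 10 = n := by omega
      rw [pvStrHoles, pvToDigits_small n h10, hq0, hr]
      rw [pvDigitHoles_nonpos _ (by norm_num)]
      simp [pvCharHole_digit n h10]
    · rw [pvStrHoles, pvToDigits_split n (by omega)]
      rw [List.map_append, List.sum_append]
      rw [show ((Nat.toDigits 10 (n / 10)).map pvCharHole).sum = pvStrHoles (n / 10) from rfl]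
      rw [ih (n / 10) (by omega) (by omega)]
      simp [pvCharHole_digit (n % 10) (by omega)]
      ring

-- A's fold restated: one more number appends its string's hole sum
lemma pvA_succ (N : Int) (h : 1 ≤ N) :
    sumOfHoles N = sumOfHoles (N - 1) + pvStrHoles N.toNat := by
  unfold sumOfHoles
  rw [show N + 1 = (N - 1 + 1) + 1 by ring,
      PySem.List.pyRange_one_succ_right (by omega)]
  rw [List.foldl_append]
  simp only [List.foldl]
  rw [show N - 1 + 1 = N by ring]
  rw [PySem.Int.toList_toStr, pvToChars_pos N (by omega)]
  rw [PySem.List.foldl_add (Nat.toDigits 10 N.toNat)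
        (fun digit => pvHolesDict.getD (String.ofList [digit]) 0)]
  rfl

lemma pvA_nonpos (N : Int) (h : N ≤ 0) : sumOfHoles N = 0 := by
  unfold sumOfHoles
  rw [PySem.List.pyRange_one_eq_nil (by omega)]
  rfl

-- B's recursion satisfies the same step law as A's loop
lemma pvB_succ : ∀ (k : Nat) (n : Int), n.toNat = k → 1 ≤ n →
    pvS n = pvS (n - 1) + pvDigitHoles n := by
  intro k
  induction k using Nat.strong_induction_on with
  | _ k ih =>
    intro n hk h1
    have h0 : (0:Int) < n := by omega
    rw [pvS_pos n h0, pvDigitHoles_pos n h0]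
    by_cases hr : 1 ≤ n % 10
    · by_cases hn1 : n = 1
      · subst hn1
        rw [pvB_nonpos (1 - 1) (by norm_num)]
        norm_num
        rw [pvB_nonpos (-1) (by norm_num), pvDigitHoles_nonpos 0 le_rfl]
        decide
      · rw [pvS_pos (n - 1) (by omega)]
        have e1 : (n - 1) / 10 = n / 10 := by omega
        have e2 : (n - 1) % 10 = n % 10 - 1 := by omega
        rw [e1, e2, pvPref_step (n % 10) hr (by omega)]
        ring
    · have hr0 : n % 10 = 0 := by omega
      have hn10 : 10 ≤ n := by omega
      rw [pvS_pos (n - 1) (by omega)]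
      have e1 : (n - 1) / 10 = n / 10 - 1 := by omega
      have e2 : (n - 1) % 10 = 9 := by omega
      rw [e1, e2, hr0]
      have hP0 : pvPref 0 = 1 := by decide
      have hP9 : pvPref 9 = 6 := by decide
      have hH0 : pvHole 0 = 1 := by decide
      rw [hP0, hP9, hH0]
      by_cases hq : n / 10 = 1
      · rw [hq]
        norm_num
        simp only [pvB_nonpos (-1) (by norm_num), pvB_nonpos 0 le_rfl,
          pvDigitHoles_nonpos 0 le_rfl]
        ring
      · have hstep := ih (n / 10 - 1).toNat (by omega) (n / 10 - 1) rfl (by omega)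
        linarith [hstep]

-- A = B on the naturals, by induction along the two step laws
lemma pvMain_nat : ∀ n : Nat, sumOfHoles (n : Int) = pvS (n : Int) := by
  intro n
  induction n with
  | zero => rw [show ((0:Nat):Int) = 0 from rfl, pvA_nonpos 0 (by norm_num), pvB_nonpos 0 (by norm_num)]
  | succ n ih =>
    have h1 : (1:Int) ≤ ((n + 1 : Nat) : Int) := by exact_mod_cast Nat.succ_le_succ (Nat.zero_le n)
    rw [pvA_succ _ h1, pvB_succ ((n + 1 : Nat) : Int).toNat _ rfl h1]
    have hc : (((n + 1 : Nat) : Int)) - 1 = ((n : Nat) : Int) := by push_cast; ring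
    rw [hc, ih]
    congr 1
    rw [show ((n + 1 : Nat) : Int).toNat = n + 1 by omega]
    rw [pvStrHoles_eq (n + 1) (by omega)]

-- ===== VERDICT (by name: the statement is the Claim_ definition above) =====
theorem sumOfHoles_spec : Claim_equal_sumOfHoles := by
  intro N _
  unfold Spec_sumOfHoles sumOfHoles_alt
  by_cases h : N ≤ 0
  · rw [pvA_nonpos N h, pvB_nonpos N h]
  · have hN : N = (N.toNat : Int) := by omega
    rw [hN]; exact pvMain_nat N.toNat
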